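-- pv_equiv track=rewrite | github.com/skilldeliver/skillreceiving | Advent of Code/day05.py | part_two
-- ===== SOURCE A (Python) =====
-- def part_one(string, combos):
--     changing = True
--
--     while changing:
--         old_string = string
--         for combo in combos:
--             string = string.replace(combo, '')
--         if len(string) == len(old_string):
--             changing = False
--
--     return len(old_string)
--
-- def part_two(string):
--     lets = 'qwertyuiopasdfghjklzxcvbnm'
--     small = 99999999
--
--     for l in lets:
--         curr = part_one(string.replace(l, '').replace(l.upper(), ''), combos())
--         if curr < small:
--             small = curr
--     return small
--
-- def combos():
--     combs = set()
--     lets = 'qwertyuiopasdfghjklzxcvbnm'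
--
--     for l in lets:
--         combs.add(f'{l}{l.upper()}')
--     for l in lets.upper():
--         combs.add(f'{l}{l.lower()}')
--     return combs
-- ===== SOURCE B (Python) =====
-- def part_two(string):
--     best = 99999999
--     for l in 'abcdefghijklmnopqrstuvwxyz':
--         u = l.upper()
--         stack = []
--         for c in string:
--             if c == l or c == u:
--                 continue
--             if stack and stack[-1] != c and stack[-1].lower() == c.lower() and c.isalpha():
--                 stack.pop()
--             else:
--                 stack.append(c)
--         if len(stack) < best:
--             best = len(stack)
--     return best
-- ===== Notes on version B (the rewrite author's own statement) =====
-- stated objective: alternative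
-- what changed: Replaces the repeated full-string str.replace passes over all 52 reacting pairs (re-scanned until a fixed point) with a single stack-reduction pass per removed letter, relying on the unique normal form of the polymer reaction.
import Mathlib
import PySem

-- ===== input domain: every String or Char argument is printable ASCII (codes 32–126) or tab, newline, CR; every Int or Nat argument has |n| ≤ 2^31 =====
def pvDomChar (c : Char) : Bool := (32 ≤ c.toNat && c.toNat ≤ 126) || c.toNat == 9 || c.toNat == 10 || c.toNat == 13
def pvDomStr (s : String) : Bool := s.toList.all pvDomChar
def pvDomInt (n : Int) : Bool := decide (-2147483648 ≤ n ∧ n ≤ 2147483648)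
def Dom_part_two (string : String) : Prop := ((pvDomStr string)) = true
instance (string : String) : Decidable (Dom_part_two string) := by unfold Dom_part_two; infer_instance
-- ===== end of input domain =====

-- B replaces A's repeated whole-string replace passes (rescanned until a fixed point) by a one-pass
-- stack reduction per removed letter; equal return values rest on the unique normal form of the reaction.

-- ===== PORT A =====

-- combos(): the set of the 52 two-character reacting pairs, built exactly as the Python does.
def pvCombos : PySem.Set String :=
  let lets := "qwertyuiopasdfghjklzxcvbnm"
  let c1 := lets.toList.foldl
    (fun s l => PySem.Set.add s (String.ofList [l, PySem.Chars.upperChar l]))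
    ([] : PySem.Set String)
  (PySem.Str.upper lets).toList.foldl
    (fun s l => PySem.Set.add s (String.ofList [l, PySem.Chars.lowerChar l])) c1

-- length bound used only for the termination of part_one's while loop
theorem pvReplaceGoLen (old : List Char) :
    ∀ (fuel : Nat) (l acc : List Char),
      (PySem.Chars.replace.go old [] fuel l acc).length ≤ acc.length + l.length := by
  intro fuel
  induction fuel with
  | zero => intro l acc; rw [PySem.Chars.replace.go.eq_def]; simp
  | succ n ih =>
    intro l acc
    rw [PySem.Chars.replace.go.eq_def]
    cases l with
    | nil => simp
    | cons c t =>
      simp only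
      split
      · simp only [List.reverse_nil, List.nil_append]
        have := ih (List.drop old.length (c :: t)) acc
        have hd : (List.drop old.length (c :: t)).length ≤ (c :: t).length := by
          simp [List.length_drop]
        omega
      · have := ih t (c :: acc)
        simp only [List.length_cons] at *
        omega

theorem pvReplaceLen (s old : List Char) :
    (PySem.Chars.replace s old []).length ≤ s.length := by
  rw [PySem.Chars.replace]
  split
  · next h =>
    cases old with
    | nil => simp [List.flatMap_singleton']
    | cons a t => simp [List.isEmpty] at h
  · have := pvReplaceGoLen old s.length s []
    simpa using this

theorem pvFoldlReplaceLen (ps : List String) :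
    ∀ s : List Char,
      (ps.foldl (fun acc p => PySem.Chars.replace acc p.toList []) s).length ≤ s.length := by
  induction ps with
  | nil => intro s; simp
  | cons p ps ih =>
    intro s
    simp only [List.foldl_cons]
    exact le_trans (ih _) (pvReplaceLen s p.toList)

-- one 'for combo in combos' pass of part_one's loop body
def pvPass (combos : List String) (s : List Char) : List Char :=
  combos.foldl (fun acc p => PySem.Chars.replace acc p.toList []) s

-- the 'while changing' loop of part_one; returns old_string of the final iteration
def pvPartOneLoop (combos : List String) (s : List Char) : List Char :=
  if (pvPass combos s).length = s.length then s
  else pvPartOneLoop combos (pvPass combos s)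
termination_by s.length
decreasing_by
  have := pvFoldlReplaceLen combos s
  rw [pvPass] at *
  omega

def part_one (string : String) (combos : PySem.Set String) : Int :=
  ((pvPartOneLoop combos string.toList).length : Int)

def part_two (string : String) : Int :=
  "qwertyuiopasdfghjklzxcvbnm".toList.foldl
    (fun small l =>
      let curr := part_one
        (String.ofList (PySem.Chars.replace
          (PySem.Chars.replace string.toList [l] []) [PySem.Chars.upperChar l] []))
        pvCombos
      if curr < small then curr else small)
    99999999

-- ===== PORT B =====

def part_two_alt (string : String) : Int :=
  "abcdefghijklmnopqrstuvwxyz".toList.foldl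
    (fun best l =>
      let u := PySem.Chars.upperChar l
      let stack := string.toList.foldl
        (fun st c =>
          if c = l ∨ c = u then st
          else
            match st with
            | t :: rest =>
              if t ≠ c ∧ PySem.Chars.lowerChar t = PySem.Chars.lowerChar c
                  ∧ PySem.Chars.isalpha c = true then rest
              else c :: t :: rest
            | [] => [c]) []
      if (stack.length : Int) < best then (stack.length : Int) else best)
    99999999

-- ===== PRECONDITION & SPEC =====
def Spec_part_two (string : String) (out : Int) : Prop := out = part_two_alt string
instance (string : String) (out : Int) : Decidable (Spec_part_two string out) := by unfold Spec_part_two; infer_instance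

-- ===== CLAIM (what is proved, stated in full; the proofs are below) =====
def Claim_equal_part_two : Prop := ∀ (string : String), Dom_part_two string → Spec_part_two string (part_two string)

-- ===== LEMMAS AND PROOFS =====

-- the reaction condition of B's stack test, as a proposition on two characters
abbrev PvReact (t c : Char) : Prop :=
  t ≠ c ∧ PySem.Chars.lowerChar t = PySem.Chars.lowerChar c ∧ PySem.Chars.isalpha c = true

-- B's stack push/pop step (the inner lambda of part_two_alt after the skip of the removed letter)
def pvStep (st : List Char) (c : Char) : List Char :=
  match st with
  | t :: rest => if PvReact t c then rest else c :: t :: rest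
  | [] => [c]

-- structural version of Python's s.replace(ab, '') for a two-character pattern
def pvRep (a b : Char) : List Char → List Char
  | x :: y :: t => if x = a ∧ y = b then pvRep a b t else x :: pvRep a b (y :: t)
  | l => l
termination_by l => l.length

-- stack invariant: no two adjacent stack entries react
def pvOk : List Char → Prop
  | x :: y :: t => ¬ PvReact x y ∧ pvOk (y :: t)
  | _ => True

-- no adjacent reacting pair anywhere (normal form)
def pvNoP (l : List Char) : Prop :=
  ∀ u x y v, l = u ++ x :: y :: v → ¬ PvReact x y

theorem pv_toNat_ofNat (n : Nat) (h : n < 55296) : (Char.ofNat n).toNat = n := by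
  have hv : Nat.isValidChar n := Or.inl (by omega)
  rw [Char.ofNat, dif_pos hv]
  simp [Char.toNat, Char.ofNatAux]

theorem pvChar_eq (a b : Char) (h : a.toNat = b.toNat) : a = b := by
  rw [← Char.ofNat_toNat a, ← Char.ofNat_toNat b, h]

theorem pvIslower_iff (c : Char) : PySem.Chars.islower c = true ↔ 97 ≤ c.toNat ∧ c.toNat ≤ 122 := by
  rw [PySem.Chars.islower]
  simp only [Bool.and_eq_true, decide_eq_true_eq, Char.le_def, UInt32.le_iff_toNat_le]
  rfl

theorem pvIsupper_iff (c : Char) : PySem.Chars.isupper c = true ↔ 65 ≤ c.toNat ∧ c.toNat ≤ 90 := by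
  rw [PySem.Chars.isupper]
  simp only [Bool.and_eq_true, decide_eq_true_eq, Char.le_def, UInt32.le_iff_toNat_le]
  rfl

theorem pvIsalpha_iff (c : Char) :
    PySem.Chars.isalpha c = true ↔ (65 ≤ c.toNat ∧ c.toNat ≤ 90) ∨ (97 ≤ c.toNat ∧ c.toNat ≤ 122) := by
  rw [PySem.Chars.isalpha]
  simp [pvIsupper_iff, pvIslower_iff]

theorem pvToNat_lower (c : Char) :
    (PySem.Chars.lowerChar c).toNat = if 65 ≤ c.toNat ∧ c.toNat ≤ 90 then c.toNat + 32 else c.toNat := by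
  rw [PySem.Chars.lowerChar]
  by_cases h : PySem.Chars.isupper c = true
  · have hr := (pvIsupper_iff c).mp h
    rw [if_pos h, if_pos hr, pv_toNat_ofNat _ (by omega)]
  · rw [if_neg h, if_neg (fun hc => h ((pvIsupper_iff c).mpr hc))]

-- the arithmetic content of a reaction
theorem pvReact_toNat {t c : Char} (h : PvReact t c) :
    (97 ≤ t.toNat ∧ t.toNat ≤ 122 ∧ c.toNat = t.toNat - 32) ∨
    (65 ≤ t.toNat ∧ t.toNat ≤ 90 ∧ c.toNat = t.toNat + 32) := by
  obtain ⟨hne, hlow, halpha⟩ := h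
  have hc := (pvIsalpha_iff c).mp halpha
  have hL := congrArg Char.toNat hlow
  rw [pvToNat_lower, pvToNat_lower] at hL
  have hnn : t.toNat ≠ c.toNat := fun he => hne (pvChar_eq _ _ he)
  split_ifs at hL <;> omega

theorem pvReact_symm {t c : Char} (h : PvReact t c) : PvReact c t := by
  have hr := pvReact_toNat h
  obtain ⟨hne, hlow, _⟩ := h
  exact ⟨hne.symm, hlow.symm, (pvIsalpha_iff t).mpr (by omega)⟩

theorem pvReact_unique {t a b : Char} (h1 : PvReact t a) (h2 : PvReact a b) : t = b := by
  have x1 := pvReact_toNat h1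
  have x2 := pvReact_toNat h2
  apply pvChar_eq
  omega

theorem pvOk_tail {x : Char} {t : List Char} (h : pvOk (x :: t)) : pvOk t := by
  cases t with
  | nil => trivial
  | cons y r => exact h.2

theorem pvOk_step (st : List Char) (c : Char) (h : pvOk st) : pvOk (pvStep st c) := by
  cases st with
  | nil => trivial
  | cons t rest =>
    rw [pvStep]
    split
    · exact pvOk_tail h
    · next hr => exact ⟨fun hct => hr (pvReact_symm hct), h⟩

-- a reacting pair at the front cancels under the stack reduction
theorem pvStep_pair {a b : Char} (hab : PvReact a b) (st : List Char) (h : pvOk st) :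
    pvStep (pvStep st a) b = st := by
  cases st with
  | nil => simp [pvStep, if_pos hab]
  | cons t rest =>
    by_cases hta : PvReact t a
    · have hb : b = t := (pvReact_unique hta hab).symm
      subst hb
      rw [pvStep, if_pos hta]
      cases rest with
      | nil => rfl
      | cons r rr =>
        rw [pvStep, if_neg (fun hrb => h.1 (pvReact_symm hrb))]
    · rw [pvStep, if_neg hta, pvStep, if_pos hab]

-- invariance of the stack reduction under one replace pass
theorem pvRep_foldl {a b : Char} (hab : PvReact a b) :
    ∀ (l st : List Char), pvOk st →
      List.foldl pvStep st (pvRep a b l) = List.foldl pvStep st l := by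
  intro l
  induction l using pvRep.induct (a := a) (b := b) with
  | case1 x y t hxy ih =>
    obtain ⟨rfl, rfl⟩ := hxy
    intro st hok
    rw [pvRep, if_pos ⟨rfl, rfl⟩, ih st hok]
    simp only [List.foldl_cons, pvStep_pair hab st hok]
  | case2 x y t hxy ih =>
    intro st hok
    rw [pvRep, if_neg hxy]
    simp only [List.foldl_cons]
    exact ih (pvStep st x) (pvOk_step st x hok)
  | case3 l hl =>
    intro st _
    cases l with
    | nil => simp [pvRep]
    | cons x t =>
      cases t with
      | nil => simp [pvRep]
      | cons y t => exact absurd rfl (fun h => hl x y t h)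

theorem pvRep_len_le (a b : Char) (l : List Char) : (pvRep a b l).length ≤ l.length := by
  induction l using pvRep.induct (a := a) (b := b) with
  | case1 x y t hxy ih => rw [pvRep, if_pos hxy]; simp only [List.length_cons]; omega
  | case2 x y t hxy ih =>
    rw [pvRep, if_neg hxy]; simp only [List.length_cons] at *; omega
  | case3 l hl => cases l with
    | nil => simp [pvRep]
    | cons x t => cases t with
      | nil => simp [pvRep]
      | cons y t => exact absurd rfl (fun h => hl x y t h)

theorem pvRep_eq_of_len (a b : Char) (l : List Char)
    (h : (pvRep a b l).length = l.length) : pvRep a b l = l := by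
  induction l using pvRep.induct (a := a) (b := b) with
  | case1 x y t hxy ih =>
    rw [pvRep, if_pos hxy] at h ⊢
    have := pvRep_len_le a b t
    simp only [List.length_cons] at h
    omega
  | case2 x y t hxy ih =>
    rw [pvRep, if_neg hxy] at h ⊢
    simp only [List.length_cons] at h
    rw [ih (by simp only [List.length_cons]; omega)]
  | case3 l hl => cases l with
    | nil => simp [pvRep]
    | cons x t => cases t with
      | nil => simp [pvRep]
      | cons y t => exact absurd rfl (fun hh => hl x y t hh)

theorem pvRep_lt_of_infix (a b : Char) (u v : List Char) :
    (pvRep a b (u ++ a :: b :: v)).length < (u ++ a :: b :: v).length := by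
  induction u with
  | nil =>
    simp only [List.nil_append]
    rw [pvRep, if_pos ⟨rfl, rfl⟩]
    have := pvRep_len_le a b v
    simp only [List.length_cons]
    omega
  | cons x u' ih =>
    cases hu : u' ++ a :: b :: v with
    | nil => simp at hu
    | cons y t =>
      have hxl : x :: u' ++ a :: b :: v = x :: y :: t := by rw [List.cons_append, hu]
      rw [hxl, pvRep]
      rw [hu] at ih
      split
      · have := pvRep_len_le a b t
        simp only [List.length_cons]
        omega
      · simp only [List.length_cons] at *
        omega

-- replace with a two-character pattern IS pvRep
theorem pvReplaceGo_rep (a b : Char) :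
    ∀ (fuel : Nat) (l acc : List Char), l.length ≤ fuel →
      PySem.Chars.replace.go [a, b] [] fuel l acc = acc.reverse ++ pvRep a b l := by
  intro fuel
  induction fuel with
  | zero =>
    intro l acc hl
    have : l = [] := List.length_eq_zero_iff.mp (by omega)
    subst this
    rw [PySem.Chars.replace.go.eq_def]
    simp [pvRep]
  | succ n ih =>
    intro l acc hl
    rw [PySem.Chars.replace.go.eq_def]
    cases l with
    | nil => simp [pvRep]
    | cons c t =>
      simp only
      split
      · next hpre =>
        have hp : [a, b] <+: c :: t := List.isPrefixOf_iff_prefix.mp hpre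
        obtain ⟨rest, hrest⟩ := hp
        simp only [List.cons_append, List.nil_append, List.cons.injEq] at hrest
        obtain ⟨hac, hbt⟩ := hrest
        subst hac
        subst hbt
        rw [show List.drop ([a, b] : List Char).length (a :: b :: rest) = rest from rfl]
        rw [ih rest ([].reverse ++ acc) (by simp only [List.length_cons] at hl; omega)]
        rw [pvRep, if_pos ⟨rfl, rfl⟩]
        simp
      · next hpre =>
        rw [ih t (c :: acc) (by simp only [List.length_cons] at hl; omega)]
        have hrep : pvRep a b (c :: t) = c :: pvRep a b t := by
          cases t with
          | nil => simp [pvRep]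
          | cons y t' =>
            rw [pvRep, if_neg (by
              intro hcy
              apply hpre
              rw [hcy.1, hcy.2]
              rw [List.isPrefixOf_iff_prefix]
              exact ⟨t', rfl⟩)]
        rw [hrep]
        simp

theorem pvReplace_rep (a b : Char) (l : List Char) :
    PySem.Chars.replace l [a, b] [] = pvRep a b l := by
  rw [PySem.Chars.replace]
  simp only [List.isEmpty_cons, Bool.false_eq_true, if_false]
  simpa using pvReplaceGo_rep a b l.length l [] le_rfl

-- replace with a single-character pattern is a filter
theorem pvReplaceGo_filter (x : Char) :
    ∀ (fuel : Nat) (l acc : List Char), l.length ≤ fuel →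
      PySem.Chars.replace.go [x] [] fuel l acc = acc.reverse ++ l.filter (fun c => c ≠ x) := by
  intro fuel
  induction fuel with
  | zero =>
    intro l acc hl
    have : l = [] := List.length_eq_zero_iff.mp (by omega)
    subst this
    rw [PySem.Chars.replace.go.eq_def]
    simp
  | succ n ih =>
    intro l acc hl
    rw [PySem.Chars.replace.go.eq_def]
    cases l with
    | nil => simp
    | cons c t =>
      simp only
      split
      · next hpre =>
        have hp : [x] <+: c :: t := List.isPrefixOf_iff_prefix.mp hpre
        obtain ⟨rest, hrest⟩ := hp
        simp only [List.cons_append, List.nil_append, List.cons.injEq] at hrest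
        obtain ⟨hxc, hrt⟩ := hrest
        subst hxc
        subst hrt
        rw [show List.drop ([x] : List Char).length (x :: rest) = rest from rfl]
        rw [ih rest ([].reverse ++ acc) (by simp only [List.length_cons] at hl; omega)]
        simp
      · next hpre =>
        rw [ih t (c :: acc) (by simp only [List.length_cons] at hl; omega)]
        have hcx : c ≠ x := by
          intro hcx
          apply hpre
          rw [hcx]
          simp
        simp [hcx]

theorem pvReplace_filter (x : Char) (l : List Char) :
    PySem.Chars.replace l [x] [] = l.filter (fun c => c ≠ x) := by
  rw [PySem.Chars.replace]
  simp only [List.isEmpty_cons, Bool.false_eq_true, if_false]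
  simpa using pvReplaceGo_filter x l.length l [] le_rfl

-- pvCombos, seen as character lists (kernel computation of the Python set construction)
set_option maxRecDepth 1000000 in
theorem pvCombosL_eq : pvCombos.map String.toList = [['q', 'Q'], ['w', 'W'], ['e', 'E'], ['r', 'R'], ['t', 'T'], ['y', 'Y'], ['u', 'U'], ['i', 'I'], ['o', 'O'], ['p', 'P'], ['a', 'A'], ['s', 'S'], ['d', 'D'], ['f', 'F'], ['g', 'G'], ['h', 'H'], ['j', 'J'], ['k', 'K'], ['l', 'L'], ['z', 'Z'], ['x', 'X'], ['c', 'C'], ['v', 'V'], ['b', 'B'], ['n', 'N'], ['m', 'M'], ['Q', 'q'], ['W', 'w'], ['E', 'e'], ['R', 'r'], ['T', 't'], ['Y', 'y'], ['U', 'u'], ['I', 'i'], ['O', 'o'], ['P', 'p'], ['A', 'a'], ['S', 's'], ['D', 'd'], ['F', 'f'], ['G', 'g'], ['H', 'h'], ['J', 'j'], ['K', 'k'], ['L', 'l'], ['Z', 'z'], ['X', 'x'], ['C', 'c'], ['V', 'v'], ['B', 'b'], ['N', 'n'], ['M', 'm']] := by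
  rfl

set_option maxRecDepth 1000000 in
theorem pvCombosL_ok : ∀ L ∈ pvCombos.map String.toList,
    L = [L.headD 'a', (L.drop 1).headD 'a'] ∧ PvReact (L.headD 'a') ((L.drop 1).headD 'a') := by
  rw [pvCombosL_eq]; decide

-- every element of pvCombos is a reacting two-character pair
theorem pvCombos_react : ∀ p ∈ pvCombos, ∃ a b, p.toList = [a, b] ∧ PvReact a b := by
  intro p hp
  have h := pvCombosL_ok p.toList (List.mem_map_of_mem hp)
  exact ⟨_, _, h.1, h.2⟩

-- every case pair of the 26 letters occurs in pvCombos, in both orders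
set_option maxRecDepth 1000000 in
theorem pvCombos_mem_pairL : ∀ i ∈ List.range 26,
    [Char.ofNat (97 + i), Char.ofNat (65 + i)] ∈ pvCombos.map String.toList := by
  rw [pvCombosL_eq]; decide

set_option maxRecDepth 1000000 in
theorem pvCombos_mem_pairU : ∀ i ∈ List.range 26,
    [Char.ofNat (65 + i), Char.ofNat (97 + i)] ∈ pvCombos.map String.toList := by
  rw [pvCombosL_eq]; decide

-- if the full replace pass keeps the length, the string was fixed by every replace
theorem pvFoldl_fix :
    ∀ (ps : List String), (∀ p ∈ ps, ∃ a b, p.toList = [a, b] ∧ PvReact a b) →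
      ∀ s : List Char, (pvPass ps s).length = s.length →
      ∀ p ∈ ps, PySem.Chars.replace s p.toList [] = s := by
  intro ps
  induction ps with
  | nil => intro _ s _ p hp; exact absurd hp (List.not_mem_nil)
  | cons q qs ih =>
    intro hps s hlen p hp
    obtain ⟨a, b, hq, hab⟩ := hps q List.mem_cons_self
    rw [pvPass, List.foldl_cons, ← pvPass] at hlen
    have h1 : (pvPass qs (PySem.Chars.replace s q.toList [])).length
        ≤ (PySem.Chars.replace s q.toList []).length := by
      rw [pvPass]; exact pvFoldlReplaceLen qs _
    have h2 : (PySem.Chars.replace s q.toList []).length ≤ s.length := pvReplaceLen s q.toList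
    have heq : (PySem.Chars.replace s q.toList []).length = s.length := by omega
    have hfix : PySem.Chars.replace s q.toList [] = s := by
      rw [hq] at heq ⊢
      rw [pvReplace_rep] at heq ⊢
      exact pvRep_eq_of_len _ _ _ heq
    rcases List.mem_cons.mp hp with rfl | hp'
    · exact hfix
    · refine ih (fun r hr => hps r (List.mem_cons_of_mem _ hr)) s ?_ p hp'
      rw [hfix] at hlen
      exact hlen

-- the stack reduction is invariant under a full replace pass
theorem pvFoldl_inv :
    ∀ (ps : List String), (∀ p ∈ ps, ∃ a b, p.toList = [a, b] ∧ PvReact a b) →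
      ∀ s : List Char, List.foldl pvStep [] (pvPass ps s) = List.foldl pvStep [] s := by
  intro ps
  induction ps with
  | nil => intro _ s; rfl
  | cons q qs ih =>
    intro hps s
    obtain ⟨a, b, hq, hab⟩ := hps q List.mem_cons_self
    rw [pvPass, List.foldl_cons, ← pvPass]
    rw [ih (fun r hr => hps r (List.mem_cons_of_mem _ hr)) _]
    rw [hq, pvReplace_rep]
    exact pvRep_foldl hab s [] trivial

-- the stack reduction is invariant across the whole while loop
theorem pvLoop_inv (ps : List String)
    (hps : ∀ p ∈ ps, ∃ a b, p.toList = [a, b] ∧ PvReact a b) (s : List Char) :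
    List.foldl pvStep [] (pvPartOneLoop ps s) = List.foldl pvStep [] s := by
  induction s using pvPartOneLoop.induct (combos := ps) with
  | case1 s h => rw [pvPartOneLoop, if_pos h]
  | case2 s h ih =>
    rw [pvPartOneLoop, if_neg h, ih]
    exact pvFoldl_inv ps hps s

-- the loop's result is fixed by every replace
theorem pvLoop_fix (ps : List String)
    (hps : ∀ p ∈ ps, ∃ a b, p.toList = [a, b] ∧ PvReact a b) (s : List Char) :
    ∀ p ∈ ps, PySem.Chars.replace (pvPartOneLoop ps s) p.toList [] = pvPartOneLoop ps s := by
  induction s using pvPartOneLoop.induct (combos := ps) with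
  | case1 s h =>
    rw [pvPartOneLoop, if_pos h]
    exact pvFoldl_fix ps hps s h
  | case2 s h ih =>
    rw [pvPartOneLoop, if_neg h]
    exact ih

-- a string fixed by every combo replace has no adjacent reacting pair
theorem pvFix_noP (s : List Char)
    (h : ∀ p ∈ pvCombos, PySem.Chars.replace s p.toList [] = s) : pvNoP s := by
  intro u x y v huv hxy
  rcases pvReact_toNat hxy with ⟨h1, h2, h3⟩ | ⟨h1, h2, h3⟩
  · have hx : x = Char.ofNat (97 + (x.toNat - 97)) := by
      apply pvChar_eq; rw [pv_toNat_ofNat _ (by omega)]; omega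
    have hy : y = Char.ofNat (65 + (x.toNat - 97)) := by
      apply pvChar_eq; rw [pv_toNat_ofNat _ (by omega)]; omega
    have hmem := pvCombos_mem_pairL (x.toNat - 97) (List.mem_range.mpr (by omega))
    obtain ⟨p, hp, hpl⟩ := List.mem_map.mp hmem
    have hfix := h p hp
    rw [hpl, ← hx, ← hy, pvReplace_rep] at hfix
    have hlt := pvRep_lt_of_infix x y u v
    rw [← huv, hfix] at hlt
    omega
  · have hx : x = Char.ofNat (65 + (x.toNat - 65)) := by
      apply pvChar_eq; rw [pv_toNat_ofNat _ (by omega)]; omega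
    have hy : y = Char.ofNat (97 + (x.toNat - 65)) := by
      apply pvChar_eq; rw [pv_toNat_ofNat _ (by omega)]; omega
    have hmem := pvCombos_mem_pairU (x.toNat - 65) (List.mem_range.mpr (by omega))
    obtain ⟨p, hp, hpl⟩ := List.mem_map.mp hmem
    have hfix := h p hp
    rw [hpl, ← hx, ← hy, pvReplace_rep] at hfix
    have hlt := pvRep_lt_of_infix x y u v
    rw [← huv, hfix] at hlt
    omega

-- the stack reduction fixes a normal form
theorem pvNf_foldl :
    ∀ (l st : List Char), pvOk st → pvNoP l →
      (∀ t r c d, st = t :: r → l = c :: d → ¬ PvReact t c) →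
      List.foldl pvStep st l = l.reverse ++ st := by
  intro l
  induction l with
  | nil => intro st _ _ _; simp
  | cons c d ih =>
    intro st hok hnop hhead
    have hstep : pvStep st c = c :: st := by
      cases st with
      | nil => rfl
      | cons t r => rw [pvStep, if_neg (hhead t r c d rfl rfl)]
    simp only [List.foldl_cons, hstep]
    rw [ih (c :: st) ?_ ?_ ?_]
    · simp
    · cases st with
      | nil => trivial
      | cons t r => exact ⟨fun hct => (hhead t r c d rfl rfl) (pvReact_symm hct), hok⟩
    · intro u x y v hd
      exact hnop (c :: u) x y v (by rw [List.cons_append, hd])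
    · intro t r e f hst hd
      have htc : t = c := by injection hst with h1 h2; exact h1.symm
      subst htc
      exact hnop [] t e f (by rw [List.nil_append, hd])

-- B's inner fold is the stack reduction of the filtered string
theorem pvB_inner (l u : Char) (s : List Char) :
    s.foldl
      (fun st c =>
        if c = l ∨ c = u then st
        else
          match st with
          | t :: rest => if t ≠ c ∧ PySem.Chars.lowerChar t = PySem.Chars.lowerChar c
              ∧ PySem.Chars.isalpha c = true then rest
            else c :: t :: rest
          | [] => [c]) []
      = List.foldl pvStep [] (s.filter (fun c => !(c = l ∨ c = u : Bool))) := by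
  rw [List.foldl_filter]
  have hfun : (fun (st : List Char) (c : Char) =>
      if c = l ∨ c = u then st
      else
        match st with
        | t :: rest => if t ≠ c ∧ PySem.Chars.lowerChar t = PySem.Chars.lowerChar c
            ∧ PySem.Chars.isalpha c = true then rest
          else c :: t :: rest
        | [] => [c])
      = (fun (st : List Char) (c : Char) =>
          if (!(c = l ∨ c = u : Bool)) = true then pvStep st c else st) := by
    funext st c
    by_cases hc : c = l ∨ c = u
    · simp [hc]
    · rw [if_neg hc, if_pos (by simp [hc])]
      rfl
  rw [hfun]

-- per removed letter, A's fully reduced length equals B's stack length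
theorem pvKey (s : List Char) (l : Char) :
    part_one
      (String.ofList (PySem.Chars.replace
        (PySem.Chars.replace s [l] []) [PySem.Chars.upperChar l] []))
      pvCombos
      = ((List.foldl pvStep [] (s.filter (fun c => !(c = l ∨ c = PySem.Chars.upperChar l : Bool)))).length : Int) := by
  have hd2 : PySem.Chars.replace (PySem.Chars.replace s [l] []) [PySem.Chars.upperChar l] []
      = s.filter (fun c => !(c = l ∨ c = PySem.Chars.upperChar l : Bool)) := by
    rw [pvReplace_filter, pvReplace_filter, List.filter_filter]
    apply List.filter_congr
    intro c _
    by_cases h1 : c = l <;> by_cases h2 : c = PySem.Chars.upperChar l <;> simp [h1, h2]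
  rw [part_one, String.toList_ofList, hd2]
  have hfix := pvLoop_fix pvCombos pvCombos_react
    (s.filter (fun c => !(c = l ∨ c = PySem.Chars.upperChar l : Bool)))
  have hnop := pvFix_noP _ hfix
  have hnf := pvNf_foldl (pvPartOneLoop pvCombos
      (s.filter (fun c => !(c = l ∨ c = PySem.Chars.upperChar l : Bool)))) [] trivial hnop
    (by intro t r c d hst _; simp at hst)
  have hinv := pvLoop_inv pvCombos pvCombos_react
    (s.filter (fun c => !(c = l ∨ c = PySem.Chars.upperChar l : Bool)))
  rw [hnf] at hinv
  have hlen := congrArg List.length hinv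
  simp only [List.append_nil, List.length_reverse] at hlen
  exact_mod_cast congrArg (Nat.cast : Nat → Int) hlen

-- permutation/extensionality for the running-minimum fold
theorem pvFoldl_min_ext (g : Char → Int) (l1 l2 : List Char) (hp : l1.Perm l2) (init : Int) :
    List.foldl (fun m l => if g l < m then g l else m) init l1
      = List.foldl (fun m l => if g l < m then g l else m) init l2 :=
  @List.Perm.foldl_eq _ _ (fun m l => if g l < m then g l else m) l1 l2
    ⟨by intro m x y; split_ifs <;> omega⟩ hp init

-- ===== VERDICT (by name: the statement is the Claim_ definition above) =====
theorem part_two_spec : Claim_equal_part_two := by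
  intro string _
  unfold Spec_part_two part_two part_two_alt
  have hAfun : (fun (small : Int) (l : Char) =>
      let curr := part_one
        (String.ofList (PySem.Chars.replace
          (PySem.Chars.replace string.toList [l] []) [PySem.Chars.upperChar l] []))
        pvCombos
      if curr < small then curr else small)
      = (fun (m : Int) (l : Char) =>
          if ((List.foldl pvStep [] (string.toList.filter
              (fun c => !(c = l ∨ c = PySem.Chars.upperChar l : Bool)))).length : Int) < m
          then ((List.foldl pvStep [] (string.toList.filter
              (fun c => !(c = l ∨ c = PySem.Chars.upperChar l : Bool)))).length : Int) else m) := by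
    funext m l
    simp only [pvKey string.toList l]
  have hBfun : (fun (best : Int) (l : Char) =>
      let u := PySem.Chars.upperChar l
      let stack := string.toList.foldl
        (fun st c =>
          if c = l ∨ c = u then st
          else
            match st with
            | t :: rest =>
              if t ≠ c ∧ PySem.Chars.lowerChar t = PySem.Chars.lowerChar c
                  ∧ PySem.Chars.isalpha c = true then rest
              else c :: t :: rest
            | [] => [c]) []
      if (stack.length : Int) < best then (stack.length : Int) else best)
      = (fun (m : Int) (l : Char) =>
          if ((List.foldl pvStep [] (string.toList.filter
              (fun c => !(c = l ∨ c = PySem.Chars.upperChar l : Bool)))).length : Int) < m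
          then ((List.foldl pvStep [] (string.toList.filter
              (fun c => !(c = l ∨ c = PySem.Chars.upperChar l : Bool)))).length : Int) else m) := by
    funext m l
    simp only [pvB_inner l (PySem.Chars.upperChar l) string.toList]
  rw [hAfun, hBfun]
  exact pvFoldl_min_ext _ _ _ (by decide) _
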